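-- pv_equiv track=rewrite | github.com/dearxcorex/uso_tracking | scripts/update_asset_id.py | filter_api_results_by_location
-- ===== SOURCE A (Python) =====
-- def filter_api_results_by_location(api_rows, district, subdistrict):
--     """Filter API result rows to those matching district (and subdistrict if given).
--     Falls back to district-only match if no district+subdistrict match found.
--     """
--     if not api_rows:
--         return []
--
--     # Try district + subdistrict match first
--     if subdistrict:
--         strict = []
--         for row in api_rows:
--             loc = row.get("location_text") or ""
--             if district and district in loc and subdistrict in loc:
--                 strict.append(row)
--         if strict:
--             return strict
--
--     # Fallback: district-only match
--     district_only = []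
--     for row in api_rows:
--         loc = row.get("location_text") or ""
--         if district and district in loc:
--             district_only.append(row)
--     return district_only
-- ===== SOURCE B (Python) =====
-- def filter_api_results_by_location(api_rows, district, subdistrict):
--     """Single pass over api_rows with two accumulators built simultaneously:
--     the district-only matches and (inside it) the district+subdistrict matches."""
--     if not district:
--         return []
--     district_only = []
--     strict = []
--     for row in api_rows:
--         loc = row.get("location_text") or ""
--         if district in loc:
--             district_only.append(row)
--             if subdistrict and subdistrict in loc:
--                 strict.append(row)
--     return strict or district_only
-- ===== Notes on version B (the rewrite author's own statement) =====
-- stated objective: alternative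
-- what changed: B makes a single pass over api_rows maintaining two accumulators at once (district matches and, nested inside the district test, strict district+subdistrict matches), hoists the district truthiness check out of the loop, and selects via 'strict or district_only' - instead of A's two independent full scans with an early fallback branch.
import Mathlib
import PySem

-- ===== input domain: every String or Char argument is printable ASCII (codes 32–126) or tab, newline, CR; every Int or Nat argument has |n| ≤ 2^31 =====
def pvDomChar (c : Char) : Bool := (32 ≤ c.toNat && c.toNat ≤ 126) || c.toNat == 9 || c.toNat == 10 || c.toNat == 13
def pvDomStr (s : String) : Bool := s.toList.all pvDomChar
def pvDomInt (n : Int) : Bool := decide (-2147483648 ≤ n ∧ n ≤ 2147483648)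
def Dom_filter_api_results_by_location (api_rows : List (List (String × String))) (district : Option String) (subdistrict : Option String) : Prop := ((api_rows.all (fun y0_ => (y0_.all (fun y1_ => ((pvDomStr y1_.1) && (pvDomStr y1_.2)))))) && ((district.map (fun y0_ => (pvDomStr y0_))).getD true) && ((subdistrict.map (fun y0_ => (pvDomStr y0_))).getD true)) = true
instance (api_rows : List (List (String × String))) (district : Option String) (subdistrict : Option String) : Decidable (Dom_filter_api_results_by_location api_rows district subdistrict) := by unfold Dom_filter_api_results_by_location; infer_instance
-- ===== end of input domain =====

-- B replaces A's two independent scans + fallback branch by one single pass with two simultaneous accumulators; return values proved equal on all inputs.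


-- ===== PORT A =====
-- row.get("location_text") or ""
def pvLoc (row : List (String × String)) : String :=
  ((PySem.Dict.mk row).get? "location_text").getD ""

-- Python truthiness of an Optional[str]
def pvTruthy : Option String → Bool
  | none => false
  | some s => s ≠ ""

-- the fallback district-only loop of A (the second for-loop)
def pvDistrictLoop (api_rows : List (List (String × String))) (district : Option String) : List (List (String × String)) :=
  api_rows.foldl (fun acc row =>
    let loc := pvLoc row
    if pvTruthy district && PySem.Str.isIn (district.getD "") loc then acc ++ [row] else acc) []

def filter_api_results_by_location (api_rows : List (List (String × String))) (district : Option String) (subdistrict : Option String) : List (List (String × String)) :=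
  if api_rows = [] then []
  else
    match subdistrict with
    | some sd =>
      if sd ≠ "" then
        let strict := api_rows.foldl (fun acc row =>
          let loc := pvLoc row
          if pvTruthy district && PySem.Str.isIn (district.getD "") loc && PySem.Str.isIn sd loc then acc ++ [row] else acc) []
        if strict ≠ [] then strict else pvDistrictLoop api_rows district
      else pvDistrictLoop api_rows district
    | none => pvDistrictLoop api_rows district

-- ===== PORT B =====
-- B's single loop body: one step updates both accumulators (district_only, strict) at once
def pvStep (district subdistrict : Option String)
    (st : List (List (String × String)) × List (List (String × String)))
    (row : List (String × String)) :
    List (List (String × String)) × List (List (String × String)) :=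
  let loc := pvLoc row
  if PySem.Str.isIn (district.getD "") loc then
    (st.1 ++ [row],
     if pvTruthy subdistrict && PySem.Str.isIn (subdistrict.getD "") loc then st.2 ++ [row] else st.2)
  else st

def filter_api_results_by_location_alt (api_rows : List (List (String × String))) (district : Option String) (subdistrict : Option String) : List (List (String × String)) :=
  if pvTruthy district = false then []
  else
    let st := api_rows.foldl (pvStep district subdistrict) ([], [])
    if st.2 ≠ [] then st.2 else st.1

-- ===== PRECONDITION & SPEC =====
def Spec_filter_api_results_by_location (api_rows : List (List (String × String))) (district : Option String) (subdistrict : Option String) (out : List (List (String × String))) : Prop := out = filter_api_results_by_location_alt api_rows district subdistrict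
instance (api_rows : List (List (String × String))) (district : Option String) (subdistrict : Option String) (out : List (List (String × String))) : Decidable (Spec_filter_api_results_by_location api_rows district subdistrict out) := by unfold Spec_filter_api_results_by_location; infer_instance

-- ===== CLAIM (what is proved, stated in full; the proofs are below) =====
def Claim_equal_filter_api_results_by_location : Prop := ∀ (api_rows : List (List (String × String))) (district : Option String) (subdistrict : Option String), Dom_filter_api_results_by_location api_rows district subdistrict → Spec_filter_api_results_by_location api_rows district subdistrict (filter_api_results_by_location api_rows district subdistrict)

-- ===== LEMMAS AND PROOFS =====

theorem pvDistrictLoop_eq_filter (api_rows : List (List (String × String))) (district : Option String) :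
    pvDistrictLoop api_rows district =
      api_rows.filter (fun row => pvTruthy district && PySem.Str.isIn (district.getD "") (pvLoc row)) := by
  simp only [pvDistrictLoop]
  simpa using
    PySem.List.foldl_append_if_eq_filter
      (fun row => pvTruthy district && PySem.Str.isIn (district.getD "") (pvLoc row)) api_rows []

-- B's single pass computes exactly the two filters A computes in separate loops
theorem pvStep_foldl (district subdistrict : Option String)
    (rows : List (List (String × String)))
    (don str : List (List (String × String))) :
    rows.foldl (pvStep district subdistrict) (don, str) =
      (don ++ rows.filter (fun row => PySem.Str.isIn (district.getD "") (pvLoc row)),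
       str ++ rows.filter (fun row => PySem.Str.isIn (district.getD "") (pvLoc row)
         && (pvTruthy subdistrict && PySem.Str.isIn (subdistrict.getD "") (pvLoc row)))) := by
  induction rows generalizing don str with
  | nil => simp
  | cons r rs ih =>
    simp only [List.foldl_cons, List.filter_cons, pvStep, PySem.Str.isIn] at *
    by_cases hp : PySem.Chars.isIn (district.getD "").toList (pvLoc r).toList
    · by_cases hq : (pvTruthy subdistrict && PySem.Chars.isIn (subdistrict.getD "").toList (pvLoc r).toList) = true
      · simp [hp, hq, ih]
      · simp [hp, hq, ih]
    · simp [hp, ih]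

-- ===== VERDICT (by name: the statement is the Claim_ definition above) =====
theorem filter_api_results_by_location_spec : Claim_equal_filter_api_results_by_location := by
  intro api_rows district subdistrict _
  unfold Spec_filter_api_results_by_location
  unfold filter_api_results_by_location filter_api_results_by_location_alt
  by_cases hd : pvTruthy district = false
  · -- district falsy: all A-side predicates are false
    have hfilt : ∀ (q : List (String × String) → Bool),
        api_rows.foldl (fun acc row =>
          if pvTruthy district && PySem.Str.isIn (district.getD "") (pvLoc row) && q row
          then acc ++ [row] else acc) [] = ([] : List (List (String × String))) := by
      intro q
      have := PySem.List.foldl_append_if_eq_filter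
        (fun row => pvTruthy district && PySem.Str.isIn (district.getD "") (pvLoc row) && q row)
        api_rows []
      simp only [List.nil_append] at this
      rw [this]
      simp [hd]
    have hdl : pvDistrictLoop api_rows district = [] := by
      rw [pvDistrictLoop_eq_filter]; simp [hd]
    by_cases hnil : api_rows = []
    · simp [hnil, hd]
    · simp only [if_neg hnil, hd]
      cases subdistrict with
      | none => exact hdl
      | some sd =>
        by_cases h : sd = ""
        · simp [h, hdl]
        · simp only [h, ne_eq, not_false_iff, if_pos]
          rw [hdl]
          have := hfilt (fun row => PySem.Str.isIn sd (pvLoc row))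
          simp only [Bool.and_assoc] at this ⊢
          simp
  · -- district truthy
    have hdt : pvTruthy district = true := by
      cases h : pvTruthy district
      · exact absurd h hd
      · rfl
    simp only [hd]
    rw [pvStep_foldl]
    simp only [List.nil_append]
    have hdl : pvDistrictLoop api_rows district =
        api_rows.filter (fun row => PySem.Str.isIn (district.getD "") (pvLoc row)) := by
      rw [pvDistrictLoop_eq_filter]; simp [hdt]
    by_cases hnil : api_rows = []
    · subst hnil
      cases subdistrict with
      | none => simp
      | some sd => by_cases h : sd = "" <;> simp [h]
    · simp only [if_neg hnil]
      cases subdistrict with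
      | none =>
        simp [pvTruthy, hdl]
      | some sd =>
        by_cases h : sd = ""
        · simp [h, pvTruthy, hdl]
        · have hsd : pvTruthy (some sd) = true := by simp [pvTruthy, h]
          simp only [h, ne_eq, not_false_iff, if_pos, hsd, Bool.true_and]
          have hs : api_rows.foldl (fun acc row =>
              if PySem.Str.isIn (district.getD "") (pvLoc row) && PySem.Str.isIn sd (pvLoc row)
              then acc ++ [row] else acc) [] =
              api_rows.filter (fun row => PySem.Str.isIn (district.getD "") (pvLoc row) && PySem.Str.isIn sd (pvLoc row)) := by
            simpa using PySem.List.foldl_append_if_eq_filter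
              (fun row => PySem.Str.isIn (district.getD "") (pvLoc row) && PySem.Str.isIn sd (pvLoc row)) api_rows []
          simp only [PySem.Str.isIn, Bool.and_eq_true] at hs
          simp [hs, hdl, List.filter_eq_nil_iff]
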